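-- pv_equiv track=rewrite | github.com/1lias/Advent-of-Code-2024 | day02/solution.py | is_sequence_safe
-- ===== SOURCE A (Python) =====
-- def is_sequence_safe(differences):
--     for i in range(len(differences)):
--         # Check if difference is within valid range (1-3)
--         if not 1 <= abs(differences[i]) <= 3:
--             return False
--
--         # Check for direction changes
--         if i < len(differences) - 1:
--             if (differences[i] > 0 and differences[i + 1] < 0) or \
--                (differences[i] < 0 and differences[i + 1] > 0):
--                 return False
--     return True
-- ===== SOURCE B (Python) =====
-- def is_sequence_safe(differences):
--     return (all(1 <= abs(d) <= 3 for d in differences)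
--             and (all(d > 0 for d in differences)
--                  or all(d < 0 for d in differences)))
-- ===== Notes on version B (the rewrite author's own statement) =====
-- stated objective: simpler
-- what changed: Replaces the interleaved index loop with adjacent-pair direction checks by two independent whole-list predicates: all magnitudes in 1..3, and a global uniform-sign test (all positive or all negative), which is equivalent because any element passing the magnitude check is nonzero.
import Mathlib
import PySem

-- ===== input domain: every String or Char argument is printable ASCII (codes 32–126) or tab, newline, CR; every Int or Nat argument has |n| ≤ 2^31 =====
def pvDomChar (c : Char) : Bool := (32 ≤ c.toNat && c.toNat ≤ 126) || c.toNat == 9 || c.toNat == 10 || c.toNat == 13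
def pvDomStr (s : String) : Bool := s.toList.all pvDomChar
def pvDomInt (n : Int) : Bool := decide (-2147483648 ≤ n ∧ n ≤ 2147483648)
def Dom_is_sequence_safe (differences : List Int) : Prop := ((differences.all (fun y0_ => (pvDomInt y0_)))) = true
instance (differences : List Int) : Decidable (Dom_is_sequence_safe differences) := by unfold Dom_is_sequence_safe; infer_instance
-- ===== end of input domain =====

-- B replaces A's single indexed loop (magnitude check interleaved with adjacent
-- sign-flip checks) by two independent whole-list predicates; objective: simpler.

-- ===== PORT A =====
-- the indexed for-loop of A, recursing on the index i (early returns become results)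
def is_sequence_safe_loop (differences : List Int) (i : Nat) : Bool :=
  if i < differences.length then
    let d := differences.getD i 0
    if ¬ (1 ≤ |d| ∧ |d| ≤ 3) then false
    else if i < differences.length - 1 then
      let d' := differences.getD (i + 1) 0
      if (d > 0 ∧ d' < 0) ∨ (d < 0 ∧ d' > 0) then false
      else is_sequence_safe_loop differences (i + 1)
    else is_sequence_safe_loop differences (i + 1)
  else true
termination_by differences.length - i

def is_sequence_safe (differences : List Int) : Bool :=
  is_sequence_safe_loop differences 0

-- ===== PORT B =====
def is_sequence_safe_alt (differences : List Int) : Bool :=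
  (differences.all fun d => decide (1 ≤ |d| ∧ |d| ≤ 3)) &&
    ((differences.all fun d => decide (d > 0)) || (differences.all fun d => decide (d < 0)))

-- ===== PRECONDITION & SPEC =====
def Spec_is_sequence_safe (differences : List Int) (out : Bool) : Prop := out = is_sequence_safe_alt differences
instance (differences : List Int) (out : Bool) : Decidable (Spec_is_sequence_safe differences out) := by unfold Spec_is_sequence_safe; infer_instance

-- ===== CLAIM (what is proved, stated in full; the proofs are below) =====
def Claim_equal_is_sequence_safe : Prop := ∀ (differences : List Int), Dom_is_sequence_safe differences → Spec_is_sequence_safe differences (is_sequence_safe differences)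

-- ===== LEMMAS AND PROOFS =====

lemma neg_or_pos_of_mag (a : Int) (h : 1 ≤ |a|) : a < 0 ∨ a > 0 := by
  rcases lt_trichotomy a 0 with h' | h' | h'
  · exact Or.inl h'
  · rw [h'] at h; simp at h
  · exact Or.inr h'

-- structural recharacterization of A's loop on the list itself
def seqA : List Int → Bool
  | [] => true
  | [d] => decide (1 ≤ |d| ∧ |d| ≤ 3)
  | d :: d' :: r =>
    if ¬ (1 ≤ |d| ∧ |d| ≤ 3) then false
    else if (d > 0 ∧ d' < 0) ∨ (d < 0 ∧ d' > 0) then false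
    else seqA (d' :: r)

lemma loop_eq_seqA_drop (l : List Int) :
    ∀ n i, l.length - i ≤ n → is_sequence_safe_loop l i = seqA (l.drop i) := by
  intro n
  induction n with
  | zero =>
    intro i h
    have hge : l.length ≤ i := by omega
    rw [is_sequence_safe_loop, if_neg (by omega), List.drop_eq_nil_of_le hge, seqA]
  | succ n ih =>
    intro i h
    by_cases hi : i < l.length
    · have hdrop : l.drop i = l[i] :: l.drop (i + 1) := List.drop_eq_getElem_cons hi
      have hgd : l.getD i 0 = l[i] := List.getD_eq_getElem l 0 hi
      rw [is_sequence_safe_loop, if_pos hi]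
      by_cases hlast : i < l.length - 1
      · have hi1 : i + 1 < l.length := by omega
        have hdrop1 : l.drop (i + 1) = l[i+1] :: l.drop (i + 2) := List.drop_eq_getElem_cons hi1
        have hgd1 : l.getD (i + 1) 0 = l[i+1] := List.getD_eq_getElem l 0 hi1
        rw [hdrop, hdrop1, seqA]
        simp only [hgd, hgd1, if_pos hlast]
        rw [ih (i + 1) (by omega), hdrop1]
      · have hlen : l.length = i + 1 := by omega
        have hnil : l.drop (i + 1) = [] := List.drop_eq_nil_of_le (by omega)
        rw [hdrop, hnil, seqA]
        simp only [hgd, if_neg hlast]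
        rw [ih (i + 1) (by omega), hnil, seqA]
        by_cases hm : 1 ≤ |l[i]| ∧ |l[i]| ≤ 3 <;> simp [hm]
    · rw [is_sequence_safe_loop, if_neg hi,
        List.drop_eq_nil_of_le (by omega), seqA]

lemma seqA_eq_alt (l : List Int) : seqA l = is_sequence_safe_alt l := by
  rw [Bool.eq_iff_iff]
  induction l with
  | nil => simp [seqA, is_sequence_safe_alt]
  | cons a t ih =>
    match t with
    | [] =>
      simp only [seqA, is_sequence_safe_alt, List.all_cons, List.all_nil,
        Bool.and_true, Bool.and_eq_true, Bool.or_eq_true, decide_eq_true_iff]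
      constructor
      · rintro ⟨h1, h2⟩
        exact ⟨⟨h1, h2⟩, (neg_or_pos_of_mag a h1).symm.imp id id⟩
      · rintro ⟨⟨h1, h2⟩, _⟩; exact ⟨h1, h2⟩
    | b :: r =>
      rw [seqA]
      by_cases hmag : 1 ≤ |a| ∧ |a| ≤ 3
      · rw [if_neg (not_not_intro hmag)]
        by_cases hflip : (a > 0 ∧ b < 0) ∨ (a < 0 ∧ b > 0)
        · rw [if_pos hflip]
          simp only [is_sequence_safe_alt, List.all_cons, Bool.false_eq_true, false_iff,
            Bool.and_eq_true, Bool.or_eq_true, decide_eq_true_iff]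
          rintro ⟨⟨-, ⟨hb1, -⟩, -⟩, ⟨hpa, hpb, -⟩ | ⟨hna, hnb, -⟩⟩ <;>
            rcases hflip with ⟨h1, h2⟩ | ⟨h1, h2⟩ <;> omega
        · rw [if_neg hflip, ih]
          simp only [is_sequence_safe_alt, List.all_cons, Bool.and_eq_true,
            Bool.or_eq_true, decide_eq_true_iff]
          constructor
          · rintro ⟨⟨hbm, hrm⟩, hdir⟩
            refine ⟨⟨⟨hmag.1, hmag.2⟩, hbm, hrm⟩, ?_⟩
            rcases hdir with ⟨hb, hr⟩ | ⟨hb, hr⟩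
            · have ha : a > 0 := by
                rcases neg_or_pos_of_mag a hmag.1 with h | h
                · exact absurd (Or.inr ⟨h, hb⟩) hflip
                · exact h
              exact Or.inl ⟨ha, hb, hr⟩
            · have ha : a < 0 := by
                rcases neg_or_pos_of_mag a hmag.1 with h | h
                · exact h
                · exact absurd (Or.inl ⟨h, hb⟩) hflip
              exact Or.inr ⟨ha, hb, hr⟩
          · rintro ⟨⟨-, hbm, hrm⟩, ⟨-, hb, hr⟩ | ⟨-, hb, hr⟩⟩
            · exact ⟨⟨hbm, hrm⟩, Or.inl ⟨hb, hr⟩⟩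
            · exact ⟨⟨hbm, hrm⟩, Or.inr ⟨hb, hr⟩⟩
      · rw [if_pos hmag]
        simp only [is_sequence_safe_alt, List.all_cons, Bool.false_eq_true, false_iff,
          Bool.and_eq_true, Bool.or_eq_true, decide_eq_true_iff]
        rintro ⟨⟨hm, -⟩, -⟩; exact hmag hm

-- ===== VERDICT (by name: the statement is the Claim_ definition above) =====
theorem is_sequence_safe_spec : Claim_equal_is_sequence_safe := by
  intro l _
  unfold Spec_is_sequence_safe is_sequence_safe
  rw [loop_eq_seqA_drop l l.length 0 (by omega), List.drop_zero, seqA_eq_alt]
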